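-- pv_equiv track=rewrite | github.com/ksomemo/Competitive-programming | atcoder/abc/099/C.py | rec
-- ===== SOURCE A (Python) =====
-- def rec(N):
--     """再帰
--
--     フィボナッチ数と同じ感覚でさかのぼっている
--     停止条件に加えて、初期値に気をつける必要がある
--     """
--     memo = [-1] * (N+1)
--
--     def _rec(i):
--         if i == 0:
--             return 0
--         if memo[i] != -1:
--             return memo[i]
--
--         ans = N
--         p = 1
--         while p <= i:
--             ans = min(ans, _rec(i-p) + 1)
--             p *= 6
--         p = 1
--         while p <= i:
--             ans = min(ans, _rec(i-p) + 1)
--             p *= 9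
--
--         memo[i] = ans
--
--         return ans
--
--     return _rec(N)
-- ===== SOURCE B (Python) =====
-- def rec(N):
--     coins = []
--     for b in (6, 9):
--         p = 1
--         while p <= N:
--             coins.append(p)
--             p *= b
--     dp = [0]
--     for i in range(1, N + 1):
--         best = i
--         for c in coins:
--             if c <= i:
--                 best = min(best, dp[i - c] + 1)
--         dp.append(best)
--     return dp[N]
-- ===== Notes on version B (the rewrite author's own statement) =====
-- stated objective: alternative
-- what changed: Replaces A's top-down memoized recursion (nested _rec with a memo list and two while-loops per call) by a bottom-up dynamic program: the coin list (powers of six and nine not exceeding N) is built once, then the dp table is filled iteratively from the smallest amount up, each entry being the minimum over coins of the earlier entry plus one.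
import Mathlib
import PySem

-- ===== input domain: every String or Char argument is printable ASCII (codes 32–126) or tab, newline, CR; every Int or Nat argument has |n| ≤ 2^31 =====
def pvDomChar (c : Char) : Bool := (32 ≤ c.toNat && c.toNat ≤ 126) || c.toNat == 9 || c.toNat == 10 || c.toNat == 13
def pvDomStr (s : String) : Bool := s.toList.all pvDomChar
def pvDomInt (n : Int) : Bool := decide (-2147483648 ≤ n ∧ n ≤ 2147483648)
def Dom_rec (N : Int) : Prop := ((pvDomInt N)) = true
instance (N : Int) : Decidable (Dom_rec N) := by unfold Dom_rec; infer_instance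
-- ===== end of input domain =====

-- B replaces A's top-down memoized recursion by a bottom-up DP over a precomputed coin list (alternative decomposition; return value only).

-- ===== PORT A =====
-- A's inner `while p <= i: …; p *= 6` visits exactly the powers of 6 that are ≤ i,
-- in increasing order; `pows6 i 1` is that sequence of visited p's (likewise pows9).
def pows6 (i p : Nat) : List Nat :=
  if h : 1 ≤ p ∧ p ≤ i then p :: pows6 i (6 * p) else []
termination_by i + 1 - p
decreasing_by omega

def pows9 (i p : Nat) : List Nat :=
  if h : 1 ≤ p ∧ p ≤ i then p :: pows9 i (9 * p) else []
termination_by i + 1 - p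
decreasing_by omega

-- the coins one call of A's `_rec i` iterates over: the 6-loop's powers, then the 9-loop's
def coinsA (i : Nat) : List Nat := pows6 i 1 ++ pows9 i 1

inductive AMode
  | call : Nat → AMode
  | next : AMode
  | ret  : Int → AMode

-- A's `_rec` with its Python call stack made explicit (Lean's evaluator cannot recurse as
-- deep as CPython does here): a frame (i, remaining coins, ans) is one suspended `_rec i`;
-- `memo.getD j 0` / `memo.set!` port `memo[j]` reads/writes (always in range here).
-- The fuel parameter only makes the recursion structural; the bound passed by `rec`
-- is proved sufficient below (`runA_sim`).
def runA (N : Int) : Nat → AMode → List (Nat × List Nat × Int) → Array Int → Int × Array Int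
  | 0, _, _, memo => (0, memo)
  | fuel + 1, .call i, stk, memo =>
      if i = 0 then runA N fuel (.ret 0) stk memo
      else if memo.getD i 0 ≠ -1 then runA N fuel (.ret (memo.getD i 0)) stk memo
      else runA N fuel .next ((i, coinsA i, N) :: stk) memo
  | _ + 1, .next, [], memo => (0, memo)            -- unreachable
  | fuel + 1, .next, (i, [], ans) :: stk, memo =>
      runA N fuel (.ret ans) stk (memo.set! i ans)
  | fuel + 1, .next, (i, c :: cs, ans) :: stk, memo =>
      runA N fuel (.call (i - c)) ((i, cs, ans) :: stk) memo
  | _ + 1, .ret v, [], memo => (v, memo)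
  | fuel + 1, .ret v, (i, cs, ans) :: stk, memo =>
      runA N fuel .next ((i, cs, min ans (v + 1)) :: stk) memo

def rec (N : Int) : Int :=
  let n := N.toNat
  (runA N (4 * n * n + 6 * n + 8) (.call n) [] (Array.replicate (n + 1) (-1))).1

-- ===== PORT B =====
-- `for b in (6,9): p = 1; while p <= N: coins.append(p); p *= b`
def coinsLoop (b n p : Nat) : List Nat :=
  if h : 2 ≤ b ∧ 1 ≤ p ∧ p ≤ n then p :: coinsLoop b n (b * p) else []
termination_by n + 1 - p
decreasing_by
  have : 2 * p ≤ b * p := Nat.mul_le_mul_right p h.1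
  omega

-- inner loop of Source B; `dp.getD (i - c) 0` ports `dp[i-c]`, always in range here
def bestOf (dp : Array Int) (coins : List Nat) (i : Nat) : Int :=
  coins.foldl (fun best c => if c ≤ i then min best (dp.getD (i - c) 0 + 1) else best) (i : Int)

def rec_alt (N : Int) : Int :=
  let n := N.toNat
  let coins := coinsLoop 6 n 1 ++ coinsLoop 9 n 1
  let dp := (List.range' 1 n).foldl (fun dp i => dp.push (bestOf dp coins i)) #[(0 : Int)]
  dp.getD n 0

-- ===== PRECONDITION & SPEC =====
-- A raises IndexError for N < 0 (memo is empty and memo[i] indexes out of range).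
def Pre_rec (N : Int) : Prop := 0 ≤ N
instance (N : Int) : Decidable (Pre_rec N) := by unfold Pre_rec; infer_instance
def pvWitness_rec : Int := (10)

def Spec_rec (N : Int) (out : Int) : Prop := out = rec_alt N
instance (N : Int) (out : Int) : Decidable (Spec_rec N out) := by unfold Spec_rec; infer_instance

-- ===== CLAIM (what is proved, stated in full; the proofs are below) =====
def Claim_equal_rec : Prop := ∀ (N : Int), Dom_rec N → Pre_rec N → Spec_rec N (rec N)

-- ===== LEMMAS AND PROOFS =====

-- A's recurrence without the memo machinery: the reference value both ports are related to
def recAux (N : Int) : Nat → Nat → Int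
  | _, 0 => 0
  | 0, _ + 1 => 0
  | fuel + 1, i + 1 =>
      (pows9 (i + 1) 1).foldl (fun a p => min a (recAux N fuel (i + 1 - p) + 1))
        ((pows6 (i + 1) 1).foldl (fun a p => min a (recAux N fuel (i + 1 - p) + 1)) N)

def F (N : Int) (i : Nat) : Int := recAux N i i

lemma mem_pows6 {i p q : Nat} (h : q ∈ pows6 i p) : 1 ≤ q ∧ q ≤ i ∧ p ≤ q := by
  fun_induction pows6 i p with
  | case1 p hg ih =>
    rw [List.mem_cons] at h
    rcases h with h | h
    · omega
    · have := ih h; omega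
  | case2 => simp at h

lemma mem_pows9 {i p q : Nat} (h : q ∈ pows9 i p) : 1 ≤ q ∧ q ≤ i ∧ p ≤ q := by
  fun_induction pows9 i p with
  | case1 p hg ih =>
    rw [List.mem_cons] at h
    rcases h with h | h
    · omega
    · have := ih h; omega
  | case2 => simp at h

lemma recAux_fuel (N : Int) : ∀ (f1 i : Nat), i ≤ f1 → ∀ f2, i ≤ f2 →
    recAux N f1 i = recAux N f2 i := by
  intro f1
  induction f1 with
  | zero => intro i hi f2 _; interval_cases i; cases f2 <;> rfl
  | succ f1' ih =>
    intro i hi f2 hi2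
    match i, f2 with
    | 0, f2 => cases f2 <;> rfl
    | i + 1, f2 + 1 =>
      show (pows9 (i+1) 1).foldl _ _ = (pows9 (i+1) 1).foldl _ _
      have h6 : (pows6 (i+1) 1).foldl (fun a p => min a (recAux N f1' (i + 1 - p) + 1)) N
          = (pows6 (i+1) 1).foldl (fun a p => min a (recAux N f2 (i + 1 - p) + 1)) N := by
        apply PySem.List.foldl_congr_mem
        intro acc x hx
        have hm := mem_pows6 hx
        rw [ih (i + 1 - x) (by omega) f2 (by omega)]
      rw [h6]
      apply PySem.List.foldl_congr_mem
      intro acc x hx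
      have hm := mem_pows9 hx
      rw [ih (i + 1 - x) (by omega) f2 (by omega)]

lemma F_succ (N : Int) (i : Nat) :
    F N (i + 1) = (pows6 (i + 1) 1 ++ pows9 (i + 1) 1).foldl
      (fun a p => min a (F N (i + 1 - p) + 1)) N := by
  rw [List.foldl_append]
  show (pows9 (i+1) 1).foldl _ _ = _
  have h6 : (pows6 (i+1) 1).foldl (fun a p => min a (recAux N i (i + 1 - p) + 1)) N
      = (pows6 (i+1) 1).foldl (fun a p => min a (F N (i + 1 - p) + 1)) N := by
    apply PySem.List.foldl_congr_mem
    intro acc x hx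
    have hm := mem_pows6 hx
    rw [recAux_fuel N i (i + 1 - x) (by omega) (i + 1 - x) le_rfl]; rfl
  rw [h6]
  apply PySem.List.foldl_congr_mem
  intro acc x hx
  have hm := mem_pows9 hx
  rw [recAux_fuel N i (i + 1 - x) (by omega) (i + 1 - x) le_rfl]; rfl

lemma foldl_min_le (f : Nat → Int) (l : List Nat) (a : Int) :
    l.foldl (fun s x => min s (f x)) a ≤ a := by
  induction l generalizing a with
  | nil => simp
  | cons x xs ih => exact le_trans (ih _) (min_le_left _ _)

lemma foldl_min_min (f : Nat → Int) (l : List Nat) (a b : Int) :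
    l.foldl (fun s x => min s (f x)) (min a b) = min a (l.foldl (fun s x => min s (f x)) b) := by
  induction l generalizing b with
  | nil => rfl
  | cons x xs ih =>
    show List.foldl _ (min (min a b) (f x)) xs = min a (List.foldl _ (min b (f x)) xs)
    rw [min_assoc, ih]

lemma foldl_min_init_eq (f : Nat → Int) (x : Nat) (xs : List Nat) (a b : Int)
    (ha : f x ≤ a) (hb : f x ≤ b) :
    (x :: xs).foldl (fun s y => min s (f y)) a = (x :: xs).foldl (fun s y => min s (f y)) b := by
  show List.foldl _ (min a (f x)) xs = List.foldl _ (min b (f x)) xs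
  rw [foldl_min_min f xs a (f x), foldl_min_min f xs b (f x)]
  have h := foldl_min_le f xs (f x)
  rw [min_eq_right (le_trans h ha), min_eq_right (le_trans h hb)]

lemma F_le (N : Int) (i : Nat) : F N i ≤ (i : Int) := by
  induction i with
  | zero => simp [F, recAux]
  | succ i ih =>
    have h1 : pows6 (i + 1) 1 = 1 :: pows6 (i + 1) 6 := by rw [pows6]; simp
    rw [F_succ, h1]
    have e1 : ((1 :: pows6 (i+1) 6) ++ pows9 (i+1) 1).foldl (fun a p => min a (F N (i + 1 - p) + 1)) N
        = (pows6 (i+1) 6 ++ pows9 (i+1) 1).foldl (fun a p => min a (F N (i + 1 - p) + 1)) (min N (F N i + 1)) := by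
      simp
    rw [e1]
    have h2 := foldl_min_le (fun p => F N (i + 1 - p) + 1) (pows6 (i+1) 6 ++ pows9 (i+1) 1) (min N (F N i + 1))
    have h3 := min_le_right N (F N i + 1)
    push_cast
    omega

lemma foldl_min_lb (f : Nat → Int) (l : List Nat) (a b : Int) (hb : b ≤ a)
    (hf : ∀ x ∈ l, b ≤ f x) : b ≤ l.foldl (fun s x => min s (f x)) a := by
  induction l generalizing a with
  | nil => simpa
  | cons x xs ih =>
    exact ih _ (le_min hb (hf x (List.mem_cons_self))) (fun y hy => hf y (List.mem_cons_of_mem _ hy))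

lemma F_nonneg (N : Int) (hN : 0 ≤ N) : ∀ i, 0 ≤ F N i := by
  intro i
  induction i using Nat.strong_induction_on with
  | _ i ih =>
    match i with
    | 0 => exact le_refl 0
    | j + 1 =>
      rw [F_succ]
      apply foldl_min_lb _ _ _ _ hN
      intro x hx
      rcases List.mem_append.1 hx with h | h
      · have := mem_pows6 h
        have := ih (j + 1 - x) (by omega)
        omega
      · have := mem_pows9 h
        have := ih (j + 1 - x) (by omega)
        omega

-- Array/List bridges
lemma arr_getD (a : Array Int) (i : Nat) (d : Int) : a.getD i d = a.toList.getD i d := by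
  rcases a with ⟨l⟩
  simp only [Array.getD, List.getD, List.size_toArray]
  split
  · rename_i h
    rw [List.getElem?_eq_getElem h]
    rfl
  · rename_i h
    rw [List.getElem?_eq_none (by omega)]
    rfl

lemma arr_set_toList (a : Array Int) (i : Nat) (v : Int) :
    (a.set! i v).toList = a.toList.set i v := by
  rcases a with ⟨l⟩
  simp [Array.set!]

lemma arr_size_set (a : Array Int) (i : Nat) (v : Int) : (a.set! i v).size = a.size := by
  rcases a with ⟨l⟩
  simp [Array.set!]

lemma arr_getD_set_self (a : Array Int) (i : Nat) (v : Int) (h : i < a.size) :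
    (a.set! i v).getD i 0 = v := by
  rw [arr_getD, arr_set_toList, List.getD_eq_getElem?_getD,
      List.getElem?_set_self (by simpa using h)]
  simp

lemma arr_getD_set_ne (a : Array Int) (i : Nat) (v : Int) (j : Nat) (h : j ≠ i) :
    (a.set! i v).getD j 0 = a.getD j 0 := by
  rw [arr_getD, arr_set_toList, List.getD_eq_getElem?_getD,
      List.getElem?_set_ne (by omega), ← List.getD_eq_getElem?_getD, ← arr_getD]

-- the memo invariant: right length, every set entry holds the true value
def Good (N : Int) (n : Nat) (memo : Array Int) : Prop :=
  memo.size = n + 1 ∧ ∀ j, j ≤ n → memo.getD j 0 = -1 ∨ memo.getD j 0 = F N j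

-- potential: total weight of the still-unset memo entries below i;
-- pays for all remaining machine transitions of a call of _rec on arguments < i
def wA (j : Nat) : Nat := 4 * (coinsA j).length + 2

def Phi (i : Nat) (memo : Array Int) : Nat :=
  ∑ j ∈ Finset.range i, (if memo.getD j 0 = -1 then wA j else 0)

lemma Phi_congr (i : Nat) (m1 m2 : Array Int)
    (h : ∀ j, j < i → m1.getD j 0 = m2.getD j 0) : Phi i m1 = Phi i m2 := by
  unfold Phi
  exact Finset.sum_congr rfl (fun j hj => by rw [h j (Finset.mem_range.1 hj)])

lemma Phi_set_of_ge (i j : Nat) (v : Int) (memo : Array Int) (h : i ≤ j) :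
    Phi i (memo.set! j v) = Phi i memo :=
  Phi_congr i _ _ (fun j' hj' => arr_getD_set_ne memo j v j' (by omega))

lemma Phi_succ_unset (i : Nat) (memo : Array Int) (h : memo.getD i 0 = -1) :
    Phi (i + 1) memo = Phi i memo + wA i := by
  unfold Phi
  rw [Finset.sum_range_succ, if_pos h]

lemma Phi_succ_set (i : Nat) (memo : Array Int) (h : memo.getD i 0 ≠ -1) :
    Phi (i + 1) memo = Phi i memo := by
  unfold Phi
  rw [Finset.sum_range_succ, if_neg h, add_zero]

lemma Phi_split (a b : Nat) (memo : Array Int) (h : a ≤ b) :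
    Phi b memo = Phi a memo + ∑ j ∈ Finset.Ico a b, (if memo.getD j 0 = -1 then wA j else 0) := by
  unfold Phi
  rw [Finset.range_eq_Ico]
  exact (Finset.sum_Ico_consecutive _ (Nat.zero_le a) h).symm

lemma Phi_mono (a b : Nat) (memo : Array Int) (h : a ≤ b) : Phi a memo ≤ Phi b memo := by
  rw [Phi_split a b memo h]
  omega

lemma len_pows6 : ∀ i p, (pows6 i p).length ≤ i + 1 - p := by
  intro i p
  fun_induction pows6 i p with
  | case1 p hg ih =>
    simp only [List.length_cons]
    omega
  | case2 p hg => simp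

lemma len_pows9 : ∀ i p, (pows9 i p).length ≤ i + 1 - p := by
  intro i p
  fun_induction pows9 i p with
  | case1 p hg ih =>
    simp only [List.length_cons]
    omega
  | case2 p hg => simp

lemma wA_le (j : Nat) : wA j ≤ 8 * j + 2 := by
  have h6 := len_pows6 j 1
  have h9 := len_pows9 j 1
  unfold wA coinsA
  simp only [List.length_append]
  omega

lemma Phi_bound (n : Nat) (memo : Array Int) : Phi (n + 1) memo ≤ 4 * n * n + 6 * n + 2 := by
  have h1 : Phi (n + 1) memo ≤ ∑ j ∈ Finset.range (n + 1), (8 * j + 2) := by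
    apply Finset.sum_le_sum
    intro j _
    split
    · exact wA_le j
    · omega
  have h2 : ∀ m : Nat, ∑ j ∈ Finset.range (m + 1), (8 * j + 2) = 4 * m * m + 6 * m + 2 := by
    intro m
    induction m with
    | zero => simp
    | succ m ih =>
      rw [Finset.sum_range_succ, ih]
      ring
  exact le_trans h1 (le_of_eq (h2 n))

lemma frame_sim (N : Int) (n : Nat) (fuelR : Nat)
    (hrec : ∀ i, i ≤ fuelR → i ≤ n → ∀ memo : Array Int, Good N n memo →
      ∀ fuelM (stk : List (Nat × List Nat × Int)), Phi (i + 1) memo + 2 < fuelM →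
      ∃ k memo', runA N fuelM (.call i) stk memo = runA N (fuelM - k) (.ret (F N i)) stk memo'
        ∧ Good N n memo' ∧ k + Phi (i + 1) memo' ≤ 2 + Phi (i + 1) memo ∧ 1 ≤ k ∧ k < fuelM
        ∧ ∀ j, i < j → memo'.getD j 0 = memo.getD j 0) :
    ∀ (cs : List Nat) (i0 : Nat), i0 ≤ fuelR + 1 → 1 ≤ i0 → i0 ≤ n →
      (∀ c ∈ cs, 1 ≤ c ∧ c ≤ i0) →
      ∀ (ans : Int) (memo : Array Int) (fuelM : Nat) (stk : List (Nat × List Nat × Int)),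
      Good N n memo → Phi i0 memo + 4 * cs.length + 2 < fuelM →
      ∃ k memo', runA N fuelM .next ((i0, cs, ans) :: stk) memo
          = runA N (fuelM - k) (.ret (cs.foldl (fun a c => min a (F N (i0 - c) + 1)) ans)) stk
              (memo'.set! i0 (cs.foldl (fun a c => min a (F N (i0 - c) + 1)) ans))
        ∧ Good N n memo' ∧ k + Phi i0 memo' ≤ 4 * cs.length + 1 + Phi i0 memo ∧ 1 ≤ k ∧ k < fuelM
        ∧ ∀ j, i0 ≤ j → memo'.getD j 0 = memo.getD j 0 := by
  intro cs i0 hif h1 hn'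
  induction cs with
  | nil =>
    intro _ ans memo fuelM stk hm hphi
    obtain ⟨fm, rfl⟩ : ∃ fm, fuelM = fm + 1 := ⟨fuelM - 1, by omega⟩
    refine ⟨1, memo, ?_, hm, by simp, le_rfl, by omega, fun j _ => rfl⟩
    show runA N (fm + 1) .next ((i0, [], ans) :: stk) memo
        = runA N (fm + 1 - 1) (.ret ans) stk (memo.set! i0 ans)
    rfl
  | cons c cs ihc =>
    intro hmem ans memo fuelM stk hm hphi
    obtain ⟨fm, rfl⟩ : ∃ fm, fuelM = fm + 1 := ⟨fuelM - 1, by omega⟩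
    rw [List.length_cons] at hphi
    have hc := hmem c List.mem_cons_self
    -- the recursive call for the current coin
    have hmono : Phi (i0 - c + 1) memo ≤ Phi i0 memo := Phi_mono _ _ _ (by omega)
    obtain ⟨k1, memo1, heq1, hg1, hb1, hk11, hk1lt, hpres1⟩ :=
      hrec (i0 - c) (by omega) (by omega) memo hm fm ((i0, cs, ans) :: stk) (by omega)
    -- transfer the potential bound from index i0-c+1 to index i0
    have hsplit0 := Phi_split (i0 - c + 1) i0 memo (by omega)
    have hsplit1 := Phi_split (i0 - c + 1) i0 memo1 (by omega)
    have hIco : (∑ j ∈ Finset.Ico (i0 - c + 1) i0, (if memo1.getD j 0 = -1 then wA j else 0))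
        = ∑ j ∈ Finset.Ico (i0 - c + 1) i0, (if memo.getD j 0 = -1 then wA j else 0) :=
      Finset.sum_congr rfl (fun j hj => by
        have := Finset.mem_Ico.1 hj
        rw [hpres1 j (by omega)])
    have htrans : k1 + Phi i0 memo1 ≤ 2 + Phi i0 memo := by omega
    -- the remaining coins, by induction
    obtain ⟨fm2, hfm2⟩ : ∃ fm2, fm - k1 = fm2 + 1 := ⟨fm - k1 - 1, by omega⟩
    obtain ⟨k2, memo2, heq2, hg2, hb2, hk21, hk2lt, hpres2⟩ :=
      ihc (fun x hx => hmem x (List.mem_cons_of_mem _ hx))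
        (min ans (F N (i0 - c) + 1)) memo1 fm2 stk hg1 (by omega)
    refine ⟨k1 + k2 + 2, memo2, ?_, hg2, by simp only [List.length_cons]; omega, by omega, by omega, ?_⟩
    · have e1 : runA N (fm + 1) .next ((i0, c :: cs, ans) :: stk) memo
          = runA N fm (.call (i0 - c)) ((i0, cs, ans) :: stk) memo := rfl
      have e2 : runA N (fm - k1) (.ret (F N (i0 - c))) ((i0, cs, ans) :: stk) memo1
          = runA N fm2 .next ((i0, cs, min ans (F N (i0 - c) + 1)) :: stk) memo1 := by
        rw [hfm2]
        rfl
      rw [e1, heq1, e2, heq2, List.foldl_cons,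
          show fm2 - k2 = fm + 1 - (k1 + k2 + 2) by omega]
    · intro j hj
      rw [hpres2 j hj, hpres1 j (by omega)]

lemma runA_sim (N : Int) (hN : 0 ≤ N) (n : Nat) :
    ∀ fuelR i, i ≤ fuelR → i ≤ n → ∀ memo : Array Int, Good N n memo →
      ∀ fuelM (stk : List (Nat × List Nat × Int)), Phi (i + 1) memo + 2 < fuelM →
      ∃ k memo', runA N fuelM (.call i) stk memo = runA N (fuelM - k) (.ret (F N i)) stk memo'
        ∧ Good N n memo' ∧ k + Phi (i + 1) memo' ≤ 2 + Phi (i + 1) memo ∧ 1 ≤ k ∧ k < fuelM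
        ∧ ∀ j, i < j → memo'.getD j 0 = memo.getD j 0 := by
  intro fuelR
  induction fuelR with
  | zero =>
    intro i hi hin memo hm fuelM stk hphi
    interval_cases i
    obtain ⟨fm, rfl⟩ : ∃ fm, fuelM = fm + 1 := ⟨fuelM - 1, by omega⟩
    refine ⟨1, memo, ?_, hm, by omega, le_rfl, by omega, fun j _ => rfl⟩
    show runA N (fm + 1) (.call 0) stk memo = runA N (fm + 1 - 1) (.ret (F N 0)) stk memo
    simp [runA]
    rfl
  | succ fuelR ih =>
    intro i hi hin memo hm fuelM stk hphi
    obtain ⟨fm, rfl⟩ : ∃ fm, fuelM = fm + 1 := ⟨fuelM - 1, by omega⟩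
    cases i with
    | zero =>
      refine ⟨1, memo, ?_, hm, by omega, le_rfl, by omega, fun j _ => rfl⟩
      show runA N (fm + 1) (.call 0) stk memo = runA N (fm + 1 - 1) (.ret (F N 0)) stk memo
      simp [runA]
      rfl
    | succ j =>
      by_cases hhit : memo.getD (j + 1) 0 = -1
      · -- miss: push a frame and run it via frame_sim
        have hstep : runA N (fm + 1) (.call (j + 1)) stk memo
            = runA N fm .next ((j + 1, coinsA (j + 1), N) :: stk) memo := by
          simp [runA, hhit]
        have hw : Phi (j + 1 + 1) memo = Phi (j + 1) memo + (4 * (coinsA (j + 1)).length + 2) :=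
          Phi_succ_unset (j + 1) memo hhit
        obtain ⟨kf, memo2, heqf, hg2, hb2, hkf1, hkflt, hpresf⟩ :=
          frame_sim N n fuelR ih (coinsA (j + 1)) (j + 1) (by omega) (by omega) hin
            (fun x hx => by
              rcases List.mem_append.1 hx with h | h
              · have := mem_pows6 h; omega
              · have := mem_pows9 h; omega)
            N memo fm stk hm (by omega)
        have hvF : (coinsA (j + 1)).foldl (fun a c => min a (F N (j + 1 - c) + 1)) N
            = F N (j + 1) := (F_succ N j).symm
        rw [hvF] at heqf
        have hsize : j + 1 < memo2.size := by
          rw [hg2.1]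
          omega
        refine ⟨1 + kf, memo2.set! (j + 1) (F N (j + 1)), ?_, ?_, ?_, by omega, by omega, ?_⟩
        · rw [hstep, heqf, show fm - kf = fm + 1 - (1 + kf) by omega]
        · refine ⟨by rw [arr_size_set]; exact hg2.1, fun j' hj' => ?_⟩
          by_cases hj'' : j' = j + 1
          · subst hj''
            right
            rw [arr_getD_set_self _ _ _ hsize]
          · rw [arr_getD_set_ne _ _ _ _ hj'']
            exact hg2.2 j' hj'
        · have hne : (memo2.set! (j + 1) (F N (j + 1))).getD (j + 1) 0 ≠ -1 := by
            rw [arr_getD_set_self _ _ _ hsize]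
            have := F_nonneg N hN (j + 1)
            omega
          rw [Phi_succ_set (j + 1) _ hne, Phi_set_of_ge (j + 1) (j + 1) _ memo2 le_rfl]
          omega
        · intro j' hj'
          rw [arr_getD_set_ne _ _ _ _ (by omega), hpresf j' (by omega)]
      · -- hit: the stored entry is the true value
        have hvF : memo.getD (j + 1) 0 = F N (j + 1) := by
          rcases hm.2 (j + 1) hin with h | h
          · exact absurd h hhit
          · exact h
        refine ⟨1, memo, ?_, hm, by omega, le_rfl, by omega, fun j' _ => rfl⟩
        show runA N (fm + 1) (.call (j + 1)) stk memo
            = runA N (fm + 1 - 1) (.ret (F N (j + 1))) stk memo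
        rw [← hvF]
        simp only [runA, Nat.add_sub_cancel]
        rw [if_neg (by omega), if_pos hhit]

lemma pows6_eq_coinsLoop (i p : Nat) : pows6 i p = coinsLoop 6 i p := by
  fun_induction pows6 i p with
  | case1 p hg ih => rw [coinsLoop]; simp [hg.1, hg.2, ih]
  | case2 p hg => rw [coinsLoop]; simp; omega

lemma pows9_eq_coinsLoop (i p : Nat) : pows9 i p = coinsLoop 9 i p := by
  fun_induction pows9 i p with
  | case1 p hg ih => rw [coinsLoop]; simp [hg.1, hg.2, ih]
  | case2 p hg => rw [coinsLoop]; simp; omega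

lemma coinsLoop_filter (b n i p : Nat) (hin : i ≤ n) :
    (coinsLoop b n p).filter (fun c => decide (c ≤ i)) = coinsLoop b i p := by
  fun_induction coinsLoop b n p with
  | case1 p hg ih =>
    by_cases hpi : p ≤ i
    · rw [List.filter_cons_of_pos (by simpa), ih]
      conv_rhs => rw [coinsLoop, dif_pos ⟨hg.1, hg.2.1, hpi⟩]
    · rw [List.filter_cons_of_neg (by simp; omega), ih]
      have hbp : 2 * p ≤ b * p := Nat.mul_le_mul_right p hg.1
      rw [coinsLoop, dif_neg (by omega)]
      rw [coinsLoop, dif_neg (by omega)]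
  | case2 p hg =>
    rw [coinsLoop, dif_neg (by omega)]
    simp

lemma bestOf_eq (N : Int) (n i : Nat) (dp : Array Int) (h1 : 1 ≤ i) (hin : i ≤ n)
    (hN : (i : Int) ≤ N) (hdp : dp.toList = (List.range i).map (F N)) :
    bestOf dp (coinsLoop 6 n 1 ++ coinsLoop 9 n 1) i = F N i := by
  obtain ⟨k, rfl⟩ : ∃ k, i = k + 1 := ⟨i - 1, by omega⟩
  unfold bestOf
  rw [PySem.List.foldl_ite_eq_foldl_filter]
  rw [List.filter_append, coinsLoop_filter 6 n (k+1) 1 hin, coinsLoop_filter 9 n (k+1) 1 hin,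
      ← pows6_eq_coinsLoop, ← pows9_eq_coinsLoop]
  have hcong : (pows6 (k+1) 1 ++ pows9 (k+1) 1).foldl
        (fun best c => min best (dp.getD (k+1-c) 0 + 1)) (((k+1 : Nat)) : Int)
      = (pows6 (k+1) 1 ++ pows9 (k+1) 1).foldl (fun best c => min best (F N (k+1-c) + 1)) (((k+1 : Nat)) : Int) := by
    apply PySem.List.foldl_congr_mem
    intro acc c hc
    have hc1 : 1 ≤ c ∧ c ≤ k + 1 := by
      rcases List.mem_append.1 hc with h | h
      · have := mem_pows6 h; omega
      · have := mem_pows9 h; omega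
    rw [arr_getD, hdp, List.getD_eq_getElem?_getD, List.getElem?_map, List.getElem?_range (by omega)]
    simp
  rw [hcong, F_succ]
  have h6 : pows6 (k+1) 1 = 1 :: pows6 (k+1) 6 := by rw [pows6]; simp
  rw [h6, List.cons_append]
  apply foldl_min_init_eq (fun c => F N (k + 1 - c) + 1)
  · show F N (k + 1 - 1) + 1 ≤ _
    simp only [Nat.add_sub_cancel]
    have := F_le N k
    push_cast
    omega
  · show F N (k + 1 - 1) + 1 ≤ N
    simp only [Nat.add_sub_cancel]
    have h1 := F_le N k
    have h2 : ((k+1 : Nat) : Int) ≤ N := hN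
    push_cast at h1 h2 ⊢
    omega

lemma dp_inv (N : Int) (n : Nat) (hN : (n : Int) ≤ N) :
    ∀ k, k ≤ n → ((List.range' 1 k).foldl
        (fun dp i => dp.push (bestOf dp (coinsLoop 6 n 1 ++ coinsLoop 9 n 1) i)) #[(0 : Int)]).toList
      = (List.range (k + 1)).map (F N) := by
  intro k
  induction k with
  | zero => intro _; simp [F, recAux]
  | succ k ih =>
    intro hk
    rw [List.range'_concat, List.foldl_append, List.foldl_cons, List.foldl_nil,
        Array.toList_push]
    have hcast : ((k + 1 : Nat) : Int) ≤ N := by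
      have : ((k + 1 : Nat) : Int) ≤ (n : Int) := by exact_mod_cast hk
      omega
    rw [show 1 + 1 * k = k + 1 by omega,
        bestOf_eq N n (k+1) _ (by omega) hk hcast (ih (by omega)), ih (by omega)]
    simp [List.range_succ]

-- ===== VERDICT (by name: the statement is the Claim_ definition above) =====
theorem rec_spec : Claim_equal_rec := by
  intro N _ hPre
  unfold Spec_rec
  have hN : N = (N.toNat : Int) := (Int.toNat_of_nonneg hPre).symm
  set n := N.toNat with hn
  -- A's side: the machine returns F N n
  have hgood : Good N n (Array.replicate (n + 1) (-1)) := by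
    refine ⟨by simp, fun j hj => ?_⟩
    left
    rw [arr_getD, Array.toList_replicate, List.getD_eq_getElem?_getD, List.getElem?_replicate]
    simp [Nat.lt_succ_of_le hj]
  have hfuel : Phi (n + 1) (Array.replicate (n + 1) (-1)) + 2 < 4 * n * n + 6 * n + 8 := by
    have := Phi_bound n (Array.replicate (n + 1) (-1))
    omega
  obtain ⟨k, memo', heq, _, _, _, hk, _⟩ :=
    runA_sim N hPre n n n le_rfl le_rfl _ hgood (4 * n * n + 6 * n + 8) [] hfuel
  have hA : rec N = F N n := by
    show (runA N (4 * n * n + 6 * n + 8) (.call n) [] (Array.replicate (n + 1) (-1))).1 = F N n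
    rw [heq]
    obtain ⟨m, hm⟩ : ∃ m, 4 * n * n + 6 * n + 8 - k = m + 1 := ⟨_, (Nat.succ_pred_eq_of_pos (by omega)).symm⟩
    rw [hm]
    rfl
  rw [hA]
  -- B's side: the dp table holds F N 0 … F N n
  have hdp := dp_inv N n (le_of_eq hN.symm) n le_rfl
  show _ = ((List.range' 1 n).foldl _ #[(0 : Int)]).getD n 0
  rw [arr_getD, hdp, List.getD_eq_getElem?_getD]
  simp [F]
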